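-- pv_equiv track=rewrite | github.com/MuriloBertelli/algoritmos-probabilisticos | las_vegas_8_rainhas/main.py | pretty_board
-- ===== SOURCE A (Python) =====
-- from typing import List, Optional, Tuple
--
-- def pretty_board(cols: List[int]) -> str:
--     n = len(cols)
--     rows = []
--     for r in range(n):
--         line = ["·"] * n
--         for c, rr in enumerate(cols):
--             if rr == r:
--                 line[c] = "Q"
--         rows.append(" ".join(line))
--     return "\n".join(rows)
-- ===== SOURCE B (Python) =====
-- def pretty_board(cols):
--     n = len(cols)
--     board = [["·"] * n for _ in range(n)]
--     for c, rr in enumerate(cols):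
--         if 0 <= rr < n:
--             board[rr][c] = "Q"
--     return "\n".join(" ".join(row) for row in board)
-- ===== Notes on version B (the rewrite author's own statement) =====
-- stated objective: simpler
-- what changed: B allocates the n-by-n grid once and places each queen directly at board[row][col] in a single pass over cols (with a 0 <= rr < n guard, since A silently ignores out-of-range rows), instead of A's rescanning of all of cols for every one of the n rows.
import Mathlib
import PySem

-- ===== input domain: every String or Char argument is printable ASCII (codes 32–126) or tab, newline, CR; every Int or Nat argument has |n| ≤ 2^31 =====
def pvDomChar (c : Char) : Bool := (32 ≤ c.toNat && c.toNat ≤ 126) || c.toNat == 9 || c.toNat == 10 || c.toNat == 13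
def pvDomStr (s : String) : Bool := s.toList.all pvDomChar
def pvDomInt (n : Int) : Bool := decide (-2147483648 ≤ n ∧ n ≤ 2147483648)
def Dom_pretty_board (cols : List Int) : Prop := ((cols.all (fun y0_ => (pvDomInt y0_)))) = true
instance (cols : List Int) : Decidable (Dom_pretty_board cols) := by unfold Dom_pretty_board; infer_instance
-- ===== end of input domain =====

-- B builds the board once and places each queen directly in a single pass (guarded to ignore
-- out-of-range rows, as A does), instead of A's per-row rescan of all of cols; objective: simpler.

-- ===== PORT A =====
def pretty_board (cols : List Int) : String :=
  let n := cols.length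
  let rows := (PySem.List.pyRange 0 (n : Int) 1).foldl
    (fun rows r =>
      let ln := (PySem.List.enumerate cols).foldl
        (fun ln p => if p.2 = r then PySem.List.pySetD ln p.1 "Q" else ln)
        (List.replicate n "·")
      rows ++ [PySem.Str.join " " ln])
    ([] : List String)
  PySem.Str.join "\n" rows

-- ===== PORT B =====
def pretty_board_alt (cols : List Int) : String :=
  let n := cols.length
  let board : List (List String) := List.replicate n (List.replicate n "·")
  let board := (PySem.List.enumerate cols).foldl
    (fun b p =>
      if 0 ≤ p.2 ∧ p.2 < (n : Int) then
        PySem.List.pySetD b p.2 (PySem.List.pySetD (PySem.List.pyGetD b p.2 []) p.1 "Q")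
      else b)
    board
  PySem.Str.join "\n" (board.map (fun row => PySem.Str.join " " row))

-- ===== PRECONDITION & SPEC =====
def Spec_pretty_board (cols : List Int) (out : String) : Prop := out = pretty_board_alt cols
instance (cols : List Int) (out : String) : Decidable (Spec_pretty_board cols out) := by unfold Spec_pretty_board; infer_instance

-- ===== CLAIM (what is proved, stated in full; the proofs are below) =====
def Claim_equal_pretty_board : Prop := ∀ (cols : List Int), Dom_pretty_board cols → Spec_pretty_board cols (pretty_board cols)

-- ===== LEMMAS AND PROOFS =====

-- A's inner loop, pointwise: a cell becomes "Q" exactly when some processed pair hits it.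
theorem foldQ_getElem? (r : Int) (e : List (Int × Int)) (hpos : ∀ p ∈ e, 0 ≤ p.1)
    (ln : List String) (j : Nat) :
    ((e.foldl (fun l p => if p.2 = r then PySem.List.pySetD l p.1 "Q" else l) ln))[j]? =
      if ((j : Int), r) ∈ e ∧ j < ln.length then some "Q" else ln[j]? := by
  induction e generalizing ln with
  | nil => simp
  | cons p t ih =>
    have hp : 0 ≤ p.1 := hpos p (List.mem_cons_self)
    simp only [List.foldl_cons]
    rw [ih (fun q hq => hpos q (List.mem_cons_of_mem _ hq))]
    have hlen : (if p.2 = r then PySem.List.pySetD ln p.1 "Q" else ln).length = ln.length := by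
      split_ifs <;> simp [PySem.List.length_pySetD]
    rw [hlen]
    by_cases hm : ((j : Int), r) ∈ t
    · by_cases hj : j < ln.length
      · simp [hm, hj]
      · have h1 : (if p.2 = r then PySem.List.pySetD ln p.1 "Q" else ln)[j]? = none :=
          List.getElem?_eq_none_iff.mpr (by rw [hlen]; omega)
        have h2 : ln[j]? = none := List.getElem?_eq_none_iff.mpr (by omega)
        simp [hm, hj, h1]
    · by_cases hpe : p = ((j : Int), r)
      · subst hpe
        simp only [PySem.List.pySetD_of_nonneg _ _ hp, Int.toNat_natCast,
          List.mem_cons, true_or, true_and]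
        by_cases hj : j < ln.length
        · simp [hj]
        · simp [hj]
      · have hstep : (if p.2 = r then PySem.List.pySetD ln p.1 "Q" else ln)[j]? = ln[j]? := by
          split_ifs with h2
          · have h1 : p.1 ≠ (j : Int) := by
              intro h; exact hpe (by cases p; simp_all)
            rw [PySem.List.pySetD_of_nonneg _ _ hp, List.getElem?_set]
            have : ¬ p.1.toNat = j := by omega
            simp [this]
          · rfl
        have hne : ¬ ((j : Int), r) = p := fun h => hpe h.symm
        rw [hstep]
        simp [hm, hne]

theorem length_foldB (n : Nat) (e : List (Int × Int)) (b : List (List String)) :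
    ((e.foldl (fun b p =>
        if 0 ≤ p.2 ∧ p.2 < (n : Int) then
          PySem.List.pySetD b p.2 (PySem.List.pySetD (PySem.List.pyGetD b p.2 []) p.1 "Q")
        else b) b)).length = b.length := by
  induction e generalizing b with
  | nil => rfl
  | cons p t ih =>
    simp only [List.foldl_cons]
    rw [ih]
    split_ifs with h
    · exact PySem.List.length_pySetD ..
    · rfl

theorem rows_foldB (n : Nat) (e : List (Int × Int)) (b : List (List String))
    (hb : b.length = n) (hrow : ∀ row ∈ b, row.length = n) :
    ∀ row ∈ (e.foldl (fun b p =>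
        if 0 ≤ p.2 ∧ p.2 < (n : Int) then
          PySem.List.pySetD b p.2 (PySem.List.pySetD (PySem.List.pyGetD b p.2 []) p.1 "Q")
        else b) b), row.length = n := by
  induction e generalizing b with
  | nil => exact hrow
  | cons p t ih =>
    intro row hr
    simp only [List.foldl_cons] at hr
    by_cases hg : 0 ≤ p.2 ∧ p.2 < (n : Int)
    · refine ih _ ?_ ?_ row (by rwa [if_pos hg] at hr)
      · rw [PySem.List.length_pySetD]; exact hb
      · intro q hq
        rw [PySem.List.pySetD_of_nonneg _ _ hg.1] at hq
        rcases List.mem_or_eq_of_mem_set hq with h | h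
        · exact hrow q h
        · subst h
          rw [PySem.List.length_pySetD]
          rw [PySem.List.pyGetD_eq_getElem _ _ hg.1 (by omega)]
          exact hrow _ (List.getElem_mem (by omega))
    · exact ih _ hb hrow row (by rwa [if_neg hg] at hr)

-- B's placement loop, pointwise on cells.
theorem foldB_getElem? (n : Nat) (e : List (Int × Int)) (hpos : ∀ p ∈ e, 0 ≤ p.1)
    (hlt : ∀ p ∈ e, p.1 < (n : Int)) (b : List (List String)) (hb : b.length = n)
    (hrow : ∀ row ∈ b, row.length = n) (i j : Nat) :
    (((e.foldl (fun b p =>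
        if 0 ≤ p.2 ∧ p.2 < (n : Int) then
          PySem.List.pySetD b p.2 (PySem.List.pySetD (PySem.List.pyGetD b p.2 []) p.1 "Q")
        else b) b))[i]?.getD [])[j]? =
      if ((j : Int), (i : Int)) ∈ e ∧ i < n then some "Q" else (b[i]?.getD [])[j]? := by
  induction e generalizing b with
  | nil => simp
  | cons p t ih =>
    have hp1 : 0 ≤ p.1 := hpos p List.mem_cons_self
    have hp1n : p.1 < (n : Int) := hlt p List.mem_cons_self
    simp only [List.foldl_cons]
    have hlen' : (if 0 ≤ p.2 ∧ p.2 < (n : Int) then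
        PySem.List.pySetD b p.2 (PySem.List.pySetD (PySem.List.pyGetD b p.2 []) p.1 "Q")
      else b).length = n := by
      have := length_foldB n [p] b
      simpa using this.trans hb
    have hrow' : ∀ row ∈ (if 0 ≤ p.2 ∧ p.2 < (n : Int) then
        PySem.List.pySetD b p.2 (PySem.List.pySetD (PySem.List.pyGetD b p.2 []) p.1 "Q")
      else b), row.length = n := by
      have := rows_foldB n [p] b hb hrow
      simpa using this
    rw [ih (fun q hq => hpos q (List.mem_cons_of_mem _ hq))
        (fun q hq => hlt q (List.mem_cons_of_mem _ hq)) _ hlen' hrow']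
    by_cases hm : ((j : Int), (i : Int)) ∈ t
    · by_cases hi : i < n
      · simp [hm, hi]
      · have h1 : (if 0 ≤ p.2 ∧ p.2 < (n : Int) then
            PySem.List.pySetD b p.2 (PySem.List.pySetD (PySem.List.pyGetD b p.2 []) p.1 "Q")
          else b)[i]? = none := List.getElem?_eq_none_iff.mpr (by omega)
        have h2 : b[i]? = none := List.getElem?_eq_none_iff.mpr (by omega)
        simp [hm, hi, h1, h2]
    · by_cases hpe : p = ((j : Int), (i : Int))
      · subst hpe
        by_cases hi : i < n
        · have hg : (0 : Int) ≤ (i : Int) ∧ (i : Int) < (n : Int) := by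
            constructor <;> omega
          rw [if_pos hg]
          have hib : i < b.length := by omega
          have hjn : j < n := by omega
          have hrowlen : b[(i:Int).toNat].length = n := hrow _ (List.getElem_mem (by omega))
          simp only [PySem.List.pySetD_of_nonneg _ _ hg.1, PySem.List.pySetD_of_nonneg _ _ hp1,
            PySem.List.pyGetD_eq_getElem _ _ hg.1 (show (i : Int) < (b.length : Int) by omega)]
          simp [List.getElem?_set, hib, hm, hi, show (i:Int).toNat = i from by omega,
            show ((j:Int)).toNat = j from by omega]
          have hbl : b[i].length = n := by simpa using hrowlen
          omega
        · have hg : ¬ ((0 : Int) ≤ (i : Int) ∧ (i : Int) < (n : Int)) := by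
            intro h; omega
          rw [if_neg hg]
          simp [hm, hi]
      · have hne : ¬ ((j : Int), (i : Int)) = p := fun h => hpe h.symm
        have hstep : ((if 0 ≤ p.2 ∧ p.2 < (n : Int) then
            PySem.List.pySetD b p.2 (PySem.List.pySetD (PySem.List.pyGetD b p.2 []) p.1 "Q")
          else b)[i]?.getD [])[j]? = (b[i]?.getD [])[j]? := by
          by_cases hg : 0 ≤ p.2 ∧ p.2 < (n : Int)
          · rw [if_pos hg, PySem.List.pySetD_of_nonneg _ _ hg.1]
            by_cases hri : p.2.toNat = i
            · have hpi : p.2 = (i : Int) := by omega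
              have hib : i < b.length := by omega
              have hj1 : ¬ p.1 = (j : Int) := by
                intro h
                exact hpe (by cases p; simp_all)
              rw [PySem.List.pyGetD_eq_getElem _ _ hg.1 (by omega),
                PySem.List.pySetD_of_nonneg _ _ hp1]
              simp only [List.getElem?_set, hri, hib]
              have : ¬ p.1.toNat = j := by omega
              simp [this, List.getElem?_eq_getElem hib]
            · simp [hri]
          · rw [if_neg hg]
        rw [hstep]
        simp [hm, hne]





theorem foldl_append_map {α β : Type} (f : α → β) (l : List α) (init : List β) :
    l.foldl (fun acc x => acc ++ [f x]) init = init ++ l.map f := by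
  induction l generalizing init with
  | nil => simp
  | cons x t ih => simp [List.foldl_cons, ih, List.append_assoc]

-- ===== VERDICT (by name: the statement is the Claim_ definition above) =====
theorem pretty_board_spec : Claim_equal_pretty_board := by
  intro cols _
  show pretty_board cols = pretty_board_alt cols
  simp only [pretty_board, pretty_board_alt]
  rw [foldl_append_map, List.nil_append]
  congr 1
  set n := cols.length with hn
  set e := PySem.List.enumerate cols with he
  have hmem : ∀ (j : Nat) (r : Int), ((j : Int), r) ∈ e ↔ ∃ h : j < n, cols[j] = r := by
    intro j r
    rw [he, PySem.List.mem_enumerate_iff]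
    constructor
    · rintro ⟨k, hk, hpk⟩
      have hjk : j = k := by
        have := congrArg Prod.fst hpk
        simp at this
        omega
      subst hjk
      refine ⟨hk, ?_⟩
      have := congrArg Prod.snd hpk
      simpa using this.symm
    · rintro ⟨hj, hc⟩
      exact ⟨j, hj, by simp [hc]⟩
  have hpos : ∀ p ∈ e, 0 ≤ p.1 := by
    intro p hp
    rcases (PySem.List.mem_enumerate_iff cols 0 p).1 hp with ⟨k, hk, rfl⟩
    simp
  have hlt : ∀ p ∈ e, p.1 < (n : Int) := by
    intro p hp
    rcases (PySem.List.mem_enumerate_iff cols 0 p).1 hp with ⟨k, hk, rfl⟩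
    simp
    omega
  set b0 : List (List String) := List.replicate n (List.replicate n "·") with hb0
  have hb0len : b0.length = n := by simp [hb0]
  have hb0row : ∀ row ∈ b0, row.length = n := by
    intro row hr
    rw [List.eq_of_mem_replicate hr]
    simp
  set bF := e.foldl (fun b p =>
      if 0 ≤ p.2 ∧ p.2 < (n : Int) then
        PySem.List.pySetD b p.2 (PySem.List.pySetD (PySem.List.pyGetD b p.2 []) p.1 "Q")
      else b) b0 with hbF
  have hbFlen : bF.length = n := by rw [hbF, length_foldB, hb0len]
  have hbFrow : ∀ row ∈ bF, row.length = n := by rw [hbF]; exact rows_foldB n e b0 hb0len hb0row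
  apply List.ext_getElem?
  intro r
  by_cases hr : r < n
  · have hA : (((PySem.List.pyRange 0 (n : Int) 1)).map (fun r => PySem.Str.join " "
        (e.foldl (fun ln p => if p.2 = r then PySem.List.pySetD ln p.1 "Q" else ln)
          (List.replicate n "·"))))[r]? = some (PySem.Str.join " "
        (e.foldl (fun ln p => if p.2 = (r : Int) then PySem.List.pySetD ln p.1 "Q" else ln)
          (List.replicate n "·"))) :=
      PySem.List.getElem?_map_pyRange_zero _ n r hr
    have hB : (bF.map (fun row => PySem.Str.join " " row))[r]? =
        some (PySem.Str.join " " bF[r]) := by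
      rw [List.getElem?_map, List.getElem?_eq_getElem (by omega)]
      rfl
    rw [hA, hB]
    congr 2
    have hrowF : bF[r] = bF[r]?.getD [] := by
      rw [List.getElem?_eq_getElem (by omega)]
      rfl
    apply List.ext_getElem?
    intro j
    rw [foldQ_getElem? _ _ hpos, hrowF]
    have := foldB_getElem? n e hpos hlt b0 hb0len hb0row r j
    rw [← hbF] at this
    rw [this]
    by_cases hmj : ((j : Int), (r : Int)) ∈ e
    · have hj : j < n := by
        rcases (hmem j (r : Int)).1 hmj with ⟨h, _⟩
        exact h
      simp [hmj, hj, hr]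
    · have hb0r : b0[r]?.getD [] = List.replicate n "·" := by
        rw [hb0, List.getElem?_replicate, if_pos hr]
        rfl
      simp [hmj, hb0r]
  · have h1 : (((PySem.List.pyRange 0 (n : Int) 1)).map (fun r => PySem.Str.join " "
        (e.foldl (fun ln p => if p.2 = r then PySem.List.pySetD ln p.1 "Q" else ln)
          (List.replicate n "·"))))[r]? = none :=
      List.getElem?_eq_none_iff.mpr
        (by simpa [PySem.List.length_pyRange_one] using Nat.le_of_not_lt hr)
    have h2 : (bF.map (fun row => PySem.Str.join " " row))[r]? = none :=
      List.getElem?_eq_none_iff.mpr (by simpa [hbFlen] using Nat.le_of_not_lt hr)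
    rw [h1, h2]
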